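-- pv_equiv track=rewrite | github.com/lizhaol-cerebras/pytorch-jit-paritybench | generated/test_mindee_doctr.py | _addindent
-- ===== SOURCE A (Python) =====
-- def _addindent(s_, num_spaces):
--     s = s_.split('\n')
--     if len(s) == 1:
--         return s_
--     first = s.pop(0)
--     s = [(num_spaces * ' ' + line) for line in s]
--     s = '\n'.join(s)
--     s = first + '\n' + s
--     return s
-- ===== SOURCE B (Python) =====
-- def _addindent(s_, num_spaces):
--     if '\n' not in s_:
--         return s_
--     return s_.replace('\n', '\n' + num_spaces * ' ')
-- ===== Notes on version B (the rewrite author's own statement) =====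
-- stated objective: simpler
-- what changed: Replaces the split/pop/map/join pipeline and the explicit single-line branch with one substitution pass: every newline is replaced by newline-plus-indent, which handles the no-newline case automatically.
import Mathlib
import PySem

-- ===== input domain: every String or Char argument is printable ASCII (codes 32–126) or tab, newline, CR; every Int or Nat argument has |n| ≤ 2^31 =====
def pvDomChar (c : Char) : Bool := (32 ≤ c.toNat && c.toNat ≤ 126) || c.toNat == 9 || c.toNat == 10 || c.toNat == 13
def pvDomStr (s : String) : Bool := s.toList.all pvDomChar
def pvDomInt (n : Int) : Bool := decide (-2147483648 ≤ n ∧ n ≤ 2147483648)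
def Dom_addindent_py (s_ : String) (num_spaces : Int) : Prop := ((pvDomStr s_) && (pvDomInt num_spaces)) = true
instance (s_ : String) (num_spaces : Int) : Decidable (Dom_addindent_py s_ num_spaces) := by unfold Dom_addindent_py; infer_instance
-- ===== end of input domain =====

-- B replaces A's split/pop/map/join pipeline by one substitution pass ('\n' → '\n' + indent); same return value everywhere.

-- ===== PORT A =====
def addindent_py (s_ : String) (num_spaces : Int) : String :=
  -- s = s_.split('\n')
  match PySem.Str.split? s_ "\n" with
  | none => s_  -- unreachable: the separator "\n" is nonempty
  | some s =>
    -- if len(s) == 1: return s_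
    if s.length = 1 then s_
    else
      -- first = s.pop(0)
      match PySem.List.pop? s 0 with
      | none => s_  -- unreachable: split never returns an empty list
      | some (first, rest) =>
        -- s = [(num_spaces * ' ' + line) for line in s]
        let s2 := rest.map (fun line => String.ofList (PySem.List.pyRepeat [' '] num_spaces) ++ line)
        -- s = '\n'.join(s); s = first + '\n' + s
        first ++ "\n" ++ PySem.Str.join "\n" s2

-- ===== PORT B =====
def addindent_py_alt (s_ : String) (num_spaces : Int) : String :=
  -- if '\n' not in s_: return s_
  if PySem.Str.isIn "\n" s_ = false then s_
  else PySem.Str.replace s_ "\n" ("\n" ++ String.ofList (PySem.List.pyRepeat [' '] num_spaces))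

-- ===== PRECONDITION & SPEC =====
def Spec_addindent_py (s_ : String) (num_spaces : Int) (out : String) : Prop := out = addindent_py_alt s_ num_spaces
instance (s_ : String) (num_spaces : Int) (out : String) : Decidable (Spec_addindent_py s_ num_spaces out) := by unfold Spec_addindent_py; infer_instance

-- ===== CLAIM (what is proved, stated in full; the proofs are below) =====
def Claim_equal_addindent_py : Prop := ∀ (s_ : String) (num_spaces : Int), Dom_addindent_py s_ num_spaces → Spec_addindent_py s_ num_spaces (addindent_py s_ num_spaces)

-- ===== LEMMAS AND PROOFS =====

-- splitting a char list at '\n', by plain structural recursion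
def splitNl : List Char → List (List Char)
  | [] => [[]]
  | c :: cs => if c = '\n' then [] :: splitNl cs else (splitNl cs).modifyHead (c :: ·)

-- the single substitution pass, per character
def subNl (ind : List Char) (c : Char) : List Char := if c = '\n' then '\n' :: ind else [c]

theorem splitNl_ne_nil (cs : List Char) : splitNl cs ≠ [] := by
  induction cs with
  | nil => simp [splitNl]
  | cons c cs ih =>
    simp only [splitNl]
    split_ifs
    · simp
    · cases hcs : splitNl cs with
      | nil => exact absurd hcs ih
      | cons h t => simp

theorem splitNl_singleton {cs h : List Char} (hs : splitNl cs = [h]) : h = cs := by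
  induction cs generalizing h with
  | nil => simp [splitNl] at hs; simp [hs]
  | cons c cs ih =>
    simp only [splitNl] at hs
    split_ifs at hs with hc
    · exact absurd (List.cons.inj hs).2 (splitNl_ne_nil cs)
    · cases hcs : splitNl cs with
      | nil => exact absurd hcs (splitNl_ne_nil cs)
      | cons h' t =>
        rw [hcs] at hs
        simp only [List.modifyHead] at hs
        rcases List.cons.inj hs with ⟨h1, h2⟩
        cases h2
        rw [← h1, ih hcs]

theorem splitOn_go_eq (cs : List Char) : ∀ (fuel : Nat) (cur : List Char) (acc : List (List Char)),
    cs.length < fuel →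
    PySem.Chars.splitOn.go ['\n'] fuel cs cur acc
      = acc.reverse ++ (splitNl cs).modifyHead (cur.reverse ++ ·) := by
  induction cs with
  | nil =>
    intro fuel cur acc hf
    cases fuel with
    | zero => omega
    | succ f => simp [PySem.Chars.splitOn.go, splitNl]
  | cons c rest ih =>
    intro fuel cur acc hf
    cases fuel with
    | zero => omega
    | succ f =>
      by_cases hc : c = '\n'
      · subst hc
        have hpre : List.isPrefixOf ['\n'] ('\n' :: rest) = true := by simp [List.isPrefixOf]
        rw [show PySem.Chars.splitOn.go ['\n'] (f + 1) ('\n' :: rest) cur acc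
              = PySem.Chars.splitOn.go ['\n'] f (List.drop (List.length ['\n']) ('\n' :: rest)) [] (cur.reverse :: acc) by
              simp [PySem.Chars.splitOn.go, hpre]]
        simp only [List.length_cons, List.length_nil, Nat.zero_add, List.drop_succ_cons, List.drop_zero]
        rw [ih f [] (cur.reverse :: acc) (by simpa using hf)]
        cases hrest : splitNl rest with
        | nil => exact absurd hrest (splitNl_ne_nil rest)
        | cons h t => simp [splitNl, hrest]
      · have hpre : List.isPrefixOf ['\n'] (c :: rest) = false := by
          simp [List.isPrefixOf]; exact fun h => absurd h.symm hc
        rw [show PySem.Chars.splitOn.go ['\n'] (f + 1) (c :: rest) cur acc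
              = PySem.Chars.splitOn.go ['\n'] f rest (c :: cur) acc by
              simp [PySem.Chars.splitOn.go, hpre]]
        rw [ih f (c :: cur) acc (by simpa using hf)]
        cases hrest : splitNl rest with
        | nil => exact absurd hrest (splitNl_ne_nil rest)
        | cons h t => simp [splitNl, hrest, hc]

theorem splitOn_nl (cs : List Char) : PySem.Chars.splitOn cs ['\n'] = splitNl cs := by
  rw [PySem.Chars.splitOn, splitOn_go_eq cs (cs.length + 1) [] [] (by omega)]
  cases hcs : splitNl cs with
  | nil => exact absurd hcs (splitNl_ne_nil cs)
  | cons h t => simp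

theorem replace_go_eq (ind : List Char) (cs : List Char) :
    ∀ (fuel : Nat) (acc : List Char), cs.length ≤ fuel →
    PySem.Chars.replace.go ['\n'] ('\n' :: ind) fuel cs acc
      = acc.reverse ++ cs.flatMap (subNl ind) := by
  induction cs with
  | nil =>
    intro fuel acc hf
    cases fuel <;> simp [PySem.Chars.replace.go]
  | cons c rest ih =>
    intro fuel acc hf
    cases fuel with
    | zero => simp at hf
    | succ f =>
      by_cases hc : c = '\n'
      · subst hc
        have hpre : List.isPrefixOf ['\n'] ('\n' :: rest) = true := by simp [List.isPrefixOf]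
        rw [show PySem.Chars.replace.go ['\n'] ('\n' :: ind) (f + 1) ('\n' :: rest) acc
              = PySem.Chars.replace.go ['\n'] ('\n' :: ind) f (List.drop (List.length ['\n']) ('\n' :: rest)) (('\n' :: ind).reverse ++ acc) by
              simp [PySem.Chars.replace.go, hpre]]
        simp only [List.length_cons, List.length_nil, Nat.zero_add, List.drop_succ_cons, List.drop_zero]
        rw [ih f _ (by simpa using Nat.le_of_succ_le_succ hf)]
        simp [subNl]
      · have hpre : List.isPrefixOf ['\n'] (c :: rest) = false := by
          simp [List.isPrefixOf]; exact fun h => absurd h.symm hc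
        rw [show PySem.Chars.replace.go ['\n'] ('\n' :: ind) (f + 1) (c :: rest) acc
              = PySem.Chars.replace.go ['\n'] ('\n' :: ind) f rest (c :: acc) by
              simp [PySem.Chars.replace.go, hpre]]
        rw [ih f _ (by simpa using Nat.le_of_succ_le_succ hf)]
        simp [subNl, hc]

theorem replace_nl (ind : List Char) (cs : List Char) :
    PySem.Chars.replace cs ['\n'] ('\n' :: ind) = cs.flatMap (subNl ind) := by
  rw [PySem.Chars.replace]
  simp only [List.isEmpty_cons, if_neg Bool.false_ne_true]
  simpa using replace_go_eq ind cs cs.length [] (Nat.le_refl _)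

theorem join_tail (ind : List Char) (t : List (List Char)) (ht : t ≠ []) :
    '\n' :: PySem.Chars.join ['\n'] (t.map (fun l => ind ++ l))
      = t.flatMap (fun l => '\n' :: (ind ++ l)) := by
  induction t with
  | nil => exact absurd rfl ht
  | cons l t ih =>
    cases t with
    | nil => simp [PySem.Chars.join_singleton]
    | cons l' t' =>
      have ih' := ih (by simp)
      simp only [List.map_cons, PySem.Chars.join_cons_cons, List.flatMap_cons] at ih' ⊢
      rw [← ih']
      simp

theorem main_glue (ind : List Char) (cs : List Char) :
    (match splitNl cs with
     | [] => cs
     | h :: t => h ++ t.flatMap (fun l => '\n' :: (ind ++ l))) = cs.flatMap (subNl ind) := by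
  induction cs with
  | nil => simp [splitNl]
  | cons c cs ih =>
    cases hcs : splitNl cs with
    | nil => exact absurd hcs (splitNl_ne_nil cs)
    | cons h t =>
      rw [hcs] at ih
      by_cases hc : c = '\n'
      · subst hc
        simp only [splitNl, reduceIte, hcs, List.flatMap_cons, subNl]
        rw [← ih]
        simp
      · simp only [splitNl, hcs, List.modifyHead, List.flatMap_cons, subNl, if_neg hc]
        rw [← ih]
        simp

-- ===== VERDICT (by name: the statement is the Claim_ definition above) =====
theorem flatMap_subNl_of_not_mem (ind : List Char) {cs : List Char} (h : '\n' ∉ cs) :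
    cs.flatMap (subNl ind) = cs := by
  induction cs with
  | nil => simp
  | cons c cs ih =>
    simp only [List.mem_cons, not_or] at h
    rw [List.flatMap_cons, ih h.2, subNl, if_neg (fun (he : c = '\n') => h.1 he.symm)]
    simp

theorem toList_alt (s_ : String) (num_spaces : Int) :
    (addindent_py_alt s_ num_spaces).toList
      = s_.toList.flatMap (subNl (List.replicate num_spaces.toNat ' ')) := by
  rw [addindent_py_alt]
  by_cases hin : PySem.Str.isIn "\n" s_ = false
  · rw [if_pos hin]
    have hnm : '\n' ∉ s_.toList := by
      intro hmem
      have ht : PySem.Str.isIn "\n" s_ = true := by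
        rw [PySem.Str.isIn_iff_infix]
        exact (List.singleton_infix_iff _ _).mpr hmem
      rw [ht] at hin
      cases hin
    rw [flatMap_subNl_of_not_mem _ hnm]
  · rw [if_neg hin, PySem.Str.toList_replace, PySem.List.pyRepeat_singleton]
    have h1 : (("\n" : String)).toList = ['\n'] := rfl
    have h2 : (("\n" : String) ++ String.ofList (List.replicate num_spaces.toNat ' ')).toList
        = '\n' :: List.replicate num_spaces.toNat ' ' := by simp [h1]
    rw [h1, h2, replace_nl]

theorem addindent_py_spec : Claim_equal_addindent_py := by
  intro s_ num_spaces _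
  unfold Spec_addindent_py
  have hsplit : PySem.Str.split? s_ "\n" = some ((splitNl s_.toList).map String.ofList) := by
    rw [PySem.Str.split?, PySem.Chars.split?]
    have h1 : (("\n" : String)).toList = ['\n'] := rfl
    rw [h1]
    simp [splitOn_nl]
  rw [addindent_py, hsplit]
  cases hcs : splitNl s_.toList with
  | nil => exact absurd hcs (splitNl_ne_nil s_.toList)
  | cons h t =>
    have hglue := main_glue (List.replicate num_spaces.toNat ' ') s_.toList
    rw [hcs] at hglue
    cases t with
    | nil =>
      simp only [List.map_cons, List.map_nil, List.length_cons, List.length_nil, reduceIte]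
      apply String.toList_inj.mp
      rw [toList_alt, ← hglue]
      simp [splitNl_singleton hcs]
    | cons t1 ts =>
      simp only [List.map_cons, List.length_cons]
      rw [if_neg (by omega), PySem.List.pop?_zero_cons]
      apply String.toList_inj.mp
      rw [toList_alt, ← hglue]
      have h1 : (("\n" : String)).toList = ['\n'] := rfl
      simp only [String.toList_append, PySem.Str.toList_join, PySem.List.pyRepeat_singleton,
        List.map_cons, List.map_map, h1, String.toList_ofList]
      have hjt := join_tail (List.replicate num_spaces.toNat ' ') (t1 :: ts) (by simp)
      simp only [List.map_cons] at hjt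
      simp only [Function.comp_def, String.toList_append, String.toList_ofList]
      rw [← hjt]
      simp
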